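-- pv_equiv track=rewrite | github.com/qiusiyuan/adventofcode | 2019/day16/day16.py | onePhase
-- ===== SOURCE A (Python) =====
-- def newPattern(state, base):
--     new = []
--     for i in range(len(base)):
--         new += state * [base[i]]
--     return new
--
-- def calculate(pattern, inputs):
--     count = 0
--     for i in range(len(inputs)):
--         count += inputs[i]*pattern[(i+1)%len(pattern)]
--         # count = count%10
--     if count < 0 and count%10 != 0:
--         return 10 - count%10
--     else:
--         return count%10
--
-- def onePhase(inputs):
--     result = []
--     state = 1
--     base = [0, 1, 0, -1]
--     while state <= len(inputs):
--         pattern = newPattern(state, base)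
--         result.append(calculate(pattern, inputs))
--         state += 1
--     return result
-- ===== SOURCE B (Python) =====
-- def onePhase(inputs):
--     # prefix sums + per-output block walk: O(n log n) instead of A's O(n^2)
--     n = len(inputs)
--     prefix = [0]
--     for x in inputs:
--         prefix.append(prefix[-1] + x)
--     out = []
--     for s in range(1, n + 1):
--         total = 0
--         for b in range(n // (4 * s) + 1):
--             o = 4 * s * b
--             total += (prefix[min(n, o + 2 * s - 1)] - prefix[min(n, o + s - 1)]
--                       - (prefix[min(n, o + 4 * s - 1)] - prefix[min(n, o + 3 * s - 1)]))
--         out.append(abs(total) % 10)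
--     return out
-- ===== Notes on version B (the rewrite author's own statement) =====
-- stated objective: faster
-- what changed: Instead of materialising each repeated 0,1,0,-1 pattern and taking an O(n) dot product per output position, B builds one prefix-sum array and evaluates each output as a difference of prefix sums over the O(n/s) constant-coefficient blocks of the pattern, reading the final digit as abs(total) % 10.
import Mathlib
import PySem

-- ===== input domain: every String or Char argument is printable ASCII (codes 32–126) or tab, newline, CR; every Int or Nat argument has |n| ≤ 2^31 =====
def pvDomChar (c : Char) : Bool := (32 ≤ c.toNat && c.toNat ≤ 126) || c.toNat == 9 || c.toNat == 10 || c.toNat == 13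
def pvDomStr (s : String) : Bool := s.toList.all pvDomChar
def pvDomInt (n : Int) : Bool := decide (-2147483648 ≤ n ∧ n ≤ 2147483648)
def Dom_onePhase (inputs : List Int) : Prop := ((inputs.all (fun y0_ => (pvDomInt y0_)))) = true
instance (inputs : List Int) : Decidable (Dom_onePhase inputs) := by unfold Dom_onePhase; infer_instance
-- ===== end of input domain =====

-- B replaces A's per-output dot product with a repeating-pattern list by one prefix-sum
-- array and O(n/s) block-range differences per output position (objective: faster).

-- ===== PORT A =====
def newPattern (state : Int) (base : List Int) : List Int :=
  (PySem.List.pyRange 0 (PySem.List.len base) 1).foldl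
    (fun new i => new ++ PySem.List.pyRepeat [PySem.List.pyGetD base i 0] state) []

def calculate (pattern : List Int) (inputs : List Int) : Int :=
  let count := (PySem.List.pyRange 0 (PySem.List.len inputs) 1).foldl
    (fun count i =>
      count + PySem.List.pyGetD inputs i 0 *
        PySem.List.pyGetD pattern (PySem.Int.mod (i + 1) (PySem.List.len pattern)) 0) 0
  if count < 0 ∧ PySem.Int.mod count 10 ≠ 0 then 10 - PySem.Int.mod count 10
  else PySem.Int.mod count 10

def onePhase (inputs : List Int) : List Int :=
  (PySem.List.pyRange 1 (PySem.List.len inputs + 1) 1).foldl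
    (fun result state => result ++ [calculate (newPattern state [0, 1, 0, -1]) inputs]) []

-- ===== PORT B =====
def onePhase_alt (inputs : List Int) : List Int :=
  let n := PySem.List.len inputs
  let pfx := inputs.foldl (fun pre x => pre ++ [PySem.List.pyGetD pre (-1) 0 + x]) [(0 : Int)]
  (PySem.List.pyRange 1 (n + 1) 1).foldl
    (fun out s =>
      let total := (PySem.List.pyRange 0 (PySem.Int.floordiv n (4 * s) + 1) 1).foldl
        (fun total b =>
          let o := 4 * s * b
          total + (PySem.List.pyGetD pfx (min n (o + 2 * s - 1)) 0
                     - PySem.List.pyGetD pfx (min n (o + s - 1)) 0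
                   - (PySem.List.pyGetD pfx (min n (o + 4 * s - 1)) 0
                      - PySem.List.pyGetD pfx (min n (o + 3 * s - 1)) 0))) 0
      out ++ [PySem.Int.mod |total| 10]) []

-- ===== PRECONDITION & SPEC =====
def Spec_onePhase (inputs : List Int) (out : List Int) : Prop := out = onePhase_alt inputs
instance (inputs : List Int) (out : List Int) : Decidable (Spec_onePhase inputs out) := by unfold Spec_onePhase; infer_instance

-- ===== CLAIM (what is proved, stated in full; the proofs are below) =====
def Claim_equal_onePhase : Prop := ∀ (inputs : List Int), Dom_onePhase inputs → Spec_onePhase inputs (onePhase inputs)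

-- ===== LEMMAS AND PROOFS =====

-- element access with 0 beyond the end
def pvA (xs : List Int) (i : Nat) : Int := xs.getD i 0
-- prefix sum of the first j elements
def pvP (xs : List Int) (j : Nat) : Int := ∑ i ∈ Finset.range j, pvA xs i
-- the FFT pattern coefficient multiplying element i (1-based shifted index j = i+1)
def pvCoef (s j : Nat) : Int :=
  if j % (4*s) < s then 0 else if j % (4*s) < 2*s then 1 else if j % (4*s) < 3*s then 0 else -1
-- A's raw dot product for output position s
def pvC (xs : List Int) (s : Nat) : Int :=
  ∑ i ∈ Finset.range xs.length, pvA xs i * pvCoef s (i+1)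
-- B's contribution of block b for output position s
def pvBlk (xs : List Int) (s b : Nat) : Int :=
  (pvP xs (min xs.length (4*s*b + 2*s - 1)) - pvP xs (min xs.length (4*s*b + s - 1)))
  - (pvP xs (min xs.length (4*s*b + 4*s - 1)) - pvP xs (min xs.length (4*s*b + 3*s - 1)))
-- B's raw total for output position s
def pvC2 (xs : List Int) (s : Nat) : Int :=
  ∑ b ∈ Finset.range (xs.length / (4*s) + 1), pvBlk xs s b
-- the repeated pattern A builds
def pvPat (s : Nat) : List Int :=
  List.replicate s 0 ++ (List.replicate s 1 ++ (List.replicate s 0 ++ List.replicate s (-1)))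

theorem pv_sum_range (f : Nat → Int) (m : Nat) :
    ((List.range m).map f).sum = ∑ i ∈ Finset.range m, f i := rfl

theorem pvA_zero (xs : List Int) (i : Nat) (h : xs.length ≤ i) : pvA xs i = 0 :=
  List.getD_eq_default xs 0 h

theorem pv_digit (c : Int) :
    (if c < 0 ∧ PySem.Int.mod c 10 ≠ 0 then 10 - PySem.Int.mod c 10 else PySem.Int.mod c 10)
      = |c| % 10 := by
  rw [PySem.Int.mod_eq_emod_of_pos (show (0:Int) < 10 by omega)]
  rcases abs_cases c with ⟨h1, h2⟩ | ⟨h1, h2⟩ <;> rw [h1] <;> split_ifs <;> omega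

theorem pv_newPattern (s : Nat) : newPattern (s : Int) [0, 1, 0, -1] = pvPat s := by
  unfold newPattern
  rw [show PySem.List.pyRange 0 (PySem.List.len [(0:Int),1,0,-1]) 1 = [0,1,2,3] from by decide]
  simp only [List.foldl_cons, List.foldl_nil, List.nil_append]
  rw [show PySem.List.pyGetD [(0:Int),1,0,-1] 0 0 = 0 from by decide,
      show PySem.List.pyGetD [(0:Int),1,0,-1] 1 0 = 1 from by decide,
      show PySem.List.pyGetD [(0:Int),1,0,-1] 2 0 = 0 from by decide,
      show PySem.List.pyGetD [(0:Int),1,0,-1] 3 0 = -1 from by decide]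
  simp [PySem.List.pyRepeat_singleton, pvPat]

theorem pv_pat_getD (s j : Nat) (hj : j < 4*s) :
    (pvPat s).getD j 0 = (if j < s then 0 else if j < 2*s then 1 else if j < 3*s then 0 else -1) := by
  rw [List.getD_eq_getElem?_getD]
  unfold pvPat
  simp only [List.getElem?_append, List.getElem?_replicate, List.length_replicate]
  split_ifs <;> first | rfl | omega

theorem pv_pat_len (s : Nat) : (pvPat s).length = 4*s := by
  simp [pvPat, List.length_replicate]; omega

theorem pv_calculate (xs : List Int) (s : Nat) (hs : 1 ≤ s) :
    calculate (pvPat s) xs = |pvC xs s| % 10 := by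
  unfold calculate
  have hlen : PySem.List.len (pvPat s) = ((4*s : Nat) : Int) := by
    rw [PySem.List.len_eq, pv_pat_len]
  have hcount : (PySem.List.pyRange 0 (PySem.List.len xs) 1).foldl
      (fun count i => count + PySem.List.pyGetD xs i 0 *
        PySem.List.pyGetD (pvPat s) (PySem.Int.mod (i + 1) (PySem.List.len (pvPat s))) 0) 0
      = pvC xs s := by
    rw [PySem.List.len_eq xs, PySem.List.pyRange_zero_nat, PySem.List.foldl_add,
      List.map_map, pv_sum_range, zero_add]
    exact Finset.sum_congr rfl fun i hi => by
      have h4 : (i+1) % (4*s) < 4*s := Nat.mod_lt _ (by omega)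
      rw [Function.comp, PySem.List.pyGetD_natCast, hlen,
        show ((i:Int) + 1) = ((i+1 : Nat) : Int) from by push_cast; ring,
        PySem.Int.mod_natCast, PySem.List.pyGetD_natCast,
        pv_pat_getD s ((i+1) % (4*s)) h4]
      rfl
  rw [hcount]
  exact pv_digit (pvC xs s)

theorem pv_onePhase (xs : List Int) :
    onePhase xs = (List.range xs.length).map (fun k => |pvC xs (k+1)| % 10) := by
  unfold onePhase
  rw [PySem.List.foldl_append_singleton_eq_map, PySem.List.len_eq, PySem.List.pyRange_one,
    show ((xs.length : Int) + 1 - 1).toNat = xs.length from by omega,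
    List.map_map, List.nil_append]
  exact List.map_congr_left fun k _ => by
    rw [Function.comp, show (1 : Int) + (k : Int) = ((k+1 : Nat) : Int) from by push_cast; ring,
      pv_newPattern (k+1), pv_calculate xs (k+1) (by omega)]

theorem pv_take_sum (xs : List Int) (j : Nat) : (xs.take j).sum = pvP xs j := by
  induction j with
  | zero => simp [pvP]
  | succ j ih =>
    rw [List.take_add_one, List.sum_append, ih]
    unfold pvP
    rw [Finset.sum_range_succ]
    congr 1
    rcases Nat.lt_or_ge j xs.length with h | h
    · rw [List.getElem?_eq_getElem h]
      simp [pvA, List.getD_eq_getElem?_getD, List.getElem?_eq_getElem h]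
    · rw [List.getElem?_eq_none_iff.mpr h]
      simp [pvA_zero xs j h]

theorem pv_pfx_fold (xs acc : List Int) (a : Int) :
    xs.foldl (fun pre x => pre ++ [PySem.List.pyGetD pre (-1) 0 + x]) (acc ++ [a])
      = acc ++ (List.range (xs.length+1)).map (fun j => a + (xs.take j).sum) := by
  induction xs generalizing acc a with
  | nil => simp
  | cons x xs ih =>
    simp only [List.foldl_cons, PySem.List.pyGetD_neg_one_append_singleton]
    rw [ih (acc ++ [a]) (a + x)]
    conv_rhs => rw [List.length_cons, List.range_succ_eq_map]
    simp only [List.map_cons, List.map_map, List.append_assoc, List.singleton_append,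
      List.take_zero, List.sum_nil, add_zero]
    congr 1
    congr 1
    exact List.map_congr_left fun j _ => by
      simp [Function.comp, List.take_succ_cons, add_assoc]

theorem pv_pfx (xs : List Int) :
    xs.foldl (fun pre x => pre ++ [PySem.List.pyGetD pre (-1) 0 + x]) [(0:Int)]
      = (List.range (xs.length+1)).map (fun j => pvP xs j) := by
  rw [show [(0:Int)] = ([] : List Int) ++ [0] from rfl, pv_pfx_fold]
  simp [pv_take_sum]

theorem pv_onePhase_alt (xs : List Int) :
    onePhase_alt xs = (List.range xs.length).map (fun k => |pvC2 xs (k+1)| % 10) := by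
  unfold onePhase_alt
  simp only [PySem.List.len_eq, pv_pfx]
  rw [PySem.List.foldl_append_singleton_eq_map, PySem.List.pyRange_one,
    show ((xs.length : Int) + 1 - 1).toNat = xs.length from by omega,
    List.map_map, List.nil_append]
  refine List.map_congr_left fun k _ => ?_
  rw [Function.comp, show (1 : Int) + (k : Int) = ((k+1 : Nat) : Int) from by push_cast; ring]
  have key : ∀ (m : Nat), PySem.List.pyGetD ((List.range (xs.length+1)).map (pvP xs))
      (min (xs.length : Int) (m : Int)) 0 = pvP xs (min xs.length m) := by
    intro m
    rw [← Nat.cast_min, PySem.List.pyGetD_natCast,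
      PySem.List.getD_map_range _ _ _ _ (by omega)]
  have hcast : (4 : Int) * ((k+1 : Nat) : Int) = ((4*(k+1) : Nat) : Int) := by push_cast; ring
  rw [hcast, PySem.Int.floordiv_natCast,
    show (((xs.length/(4*(k+1)) : Nat) : Int) + 1) = ((xs.length/(4*(k+1)) + 1 : Nat) : Int) from by
      push_cast; ring,
    PySem.List.pyRange_zero_nat, PySem.List.foldl_add, List.map_map, pv_sum_range, zero_add]
  have hterm : ∀ b : Nat,
      (PySem.List.pyGetD ((List.range (xs.length+1)).map (pvP xs))
          (min (xs.length : Int) (((4*(k+1) : Nat) : Int) * (b : Int) + 2*((k+1:Nat):Int) - 1)) 0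
        - PySem.List.pyGetD ((List.range (xs.length+1)).map (pvP xs))
          (min (xs.length : Int) (((4*(k+1) : Nat) : Int) * (b : Int) + ((k+1:Nat):Int) - 1)) 0
        - (PySem.List.pyGetD ((List.range (xs.length+1)).map (pvP xs))
          (min (xs.length : Int) (((4*(k+1) : Nat) : Int) * (b : Int) + ((4*(k+1) : Nat) : Int) - 1)) 0
          - PySem.List.pyGetD ((List.range (xs.length+1)).map (pvP xs))
          (min (xs.length : Int) (((4*(k+1) : Nat) : Int) * (b : Int) + 3*((k+1:Nat):Int) - 1)) 0))
      = pvBlk xs (k+1) b := by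
    intro b
    rw [show (((4*(k+1) : Nat) : Int) * (b : Int) + 2*((k+1:Nat):Int) - 1)
          = ((4*(k+1)*b + 2*(k+1) - 1 : Nat) : Int) from by
        rw [Nat.cast_sub (le_trans (show (1:Nat) ≤ (2*(k+1)) from by omega) (Nat.le_add_left (2*(k+1)) (4*(k+1)*b)))]; push_cast; ring,
      show (((4*(k+1) : Nat) : Int) * (b : Int) + ((k+1:Nat):Int) - 1)
          = ((4*(k+1)*b + (k+1) - 1 : Nat) : Int) from by
        rw [Nat.cast_sub (le_trans (show (1:Nat) ≤ (k+1) from by omega) (Nat.le_add_left (k+1) (4*(k+1)*b)))]; push_cast; ring,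
      show (((4*(k+1) : Nat) : Int) * (b : Int) + ((4*(k+1) : Nat) : Int) - 1)
          = ((4*(k+1)*b + 4*(k+1) - 1 : Nat) : Int) from by
        rw [Nat.cast_sub (le_trans (show (1:Nat) ≤ (4*(k+1)) from by omega) (Nat.le_add_left (4*(k+1)) (4*(k+1)*b)))]; push_cast; ring,
      show (((4*(k+1) : Nat) : Int) * (b : Int) + 3*((k+1:Nat):Int) - 1)
          = ((4*(k+1)*b + 3*(k+1) - 1 : Nat) : Int) from by
        rw [Nat.cast_sub (le_trans (show (1:Nat) ≤ (3*(k+1)) from by omega) (Nat.le_add_left (3*(k+1)) (4*(k+1)*b)))]; push_cast; ring,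
      key, key, key, key]
    rfl
  rw [PySem.Int.mod_eq_emod_of_pos (show (0:Int) < 10 from by omega)]
  simp only [Function.comp_def]
  congr 2
  unfold pvC2
  exact Finset.sum_congr rfl fun b _ => hterm b

-- grid decomposition of a range sum into consecutive blocks of width m
theorem pv_grid (m : Nat) (f : Nat → Int) :
    ∀ B, ∑ i ∈ Finset.range (m*B), f i = ∑ b ∈ Finset.range B, ∑ i ∈ Finset.range m, f (m*b+i) := by
  intro B
  induction B with
  | zero => simp
  | succ B ih => rw [Nat.mul_succ, Finset.sum_range_add, ih, Finset.sum_range_succ]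

theorem pv_coef_split (s i : Nat) (hs : 1 ≤ s) (hi : i < 4*s) :
    pvCoef s (i+1)
      = (if s-1 ≤ i ∧ i < 2*s-1 then 1 else 0) - (if 3*s-1 ≤ i ∧ i < 4*s-1 then 1 else 0) := by
  unfold pvCoef
  rcases Nat.lt_or_ge (i+1) (4*s) with h | h
  · rw [Nat.mod_eq_of_lt h]; split_ifs <;> omega
  · have he : i + 1 = 4*s := by omega
    rw [he, Nat.mod_self]; split_ifs <;> omega

theorem pv_coef_periodic (s b i : Nat) : pvCoef s (4*s*b + i + 1) = pvCoef s (i+1) := by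
  unfold pvCoef
  rw [show 4*s*b + i + 1 = (i+1) + 4*s*b from by ring, Nat.add_mul_mod_self_left]

theorem pv_ite_Ico (lo hi m : Nat) (h : hi ≤ m) (g : Nat → Int) :
    ∑ i ∈ Finset.range m, (if lo ≤ i ∧ i < hi then g i else 0) = ∑ i ∈ Finset.Ico lo hi, g i := by
  have hp : ∀ i, (if lo ≤ i ∧ i < hi then g i else 0) = (if i ∈ Finset.Ico lo hi then g i else 0) := by
    intro i; simp [Finset.mem_Ico]
  simp_rw [hp]
  rw [Finset.sum_ite_mem, Finset.range_eq_Ico, Finset.Ico_inter_Ico, Nat.min_eq_right h,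
    Nat.zero_max]

theorem pv_window (xs : List Int) (o lo hi : Nat) (h : lo ≤ hi) :
    ∑ i ∈ Finset.Ico lo hi, pvA xs (o+i) = pvP xs (o+hi) - pvP xs (o+lo) := by
  have h2 : ∑ i ∈ Finset.Ico (o+lo) (o+hi), pvA xs i = pvP xs (o+hi) - pvP xs (o+lo) :=
    Finset.sum_Ico_eq_sub _ (by omega)
  rw [← h2, Finset.sum_Ico_eq_sum_range, Finset.sum_Ico_eq_sum_range,
    show o + hi - (o + lo) = hi - lo from by omega]
  exact Finset.sum_congr rfl fun i _ => by rw [Nat.add_assoc]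

theorem pv_clamp (xs : List Int) (j : Nat) : pvP xs (min xs.length j) = pvP xs j := by
  rcases Nat.le_total j xs.length with h | h
  · rw [Nat.min_eq_right h]
  · rw [Nat.min_eq_left h]
    exact Finset.sum_subset (Finset.range_subset.mpr fun x hx => Finset.mem_range.mpr (by omega))
      (fun i _ hni => pvA_zero xs i (by simp at hni; omega))

theorem pv_inner (xs : List Int) (s b : Nat) (hs : 1 ≤ s) :
    ∑ i ∈ Finset.range (4*s), pvA xs (4*s*b+i) * pvCoef s (4*s*b+i+1) = pvBlk xs s b := by
  have step1 : ∀ i ∈ Finset.range (4*s), pvA xs (4*s*b+i) * pvCoef s (4*s*b+i+1)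
      = (if s-1 ≤ i ∧ i < 2*s-1 then pvA xs (4*s*b+i) else 0)
        - (if 3*s-1 ≤ i ∧ i < 4*s-1 then pvA xs (4*s*b+i) else 0) := by
    intro i hi
    rw [pv_coef_periodic, pv_coef_split s i hs (Finset.mem_range.mp hi)]
    split_ifs <;> ring
  rw [Finset.sum_congr rfl step1, Finset.sum_sub_distrib,
    pv_ite_Ico _ _ _ (by omega), pv_ite_Ico _ _ _ (by omega),
    pv_window xs (4*s*b) _ _ (by omega), pv_window xs (4*s*b) _ _ (by omega)]
  unfold pvBlk
  rw [pv_clamp, pv_clamp, pv_clamp, pv_clamp,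
    show 4*s*b + (2*s-1) = 4*s*b+2*s-1 from by omega,
    show 4*s*b + (s-1) = 4*s*b+s-1 from by omega,
    show 4*s*b + (4*s-1) = 4*s*b+4*s-1 from by omega,
    show 4*s*b + (3*s-1) = 4*s*b+3*s-1 from by omega]

theorem pv_C_eq (xs : List Int) (s : Nat) (hs : 1 ≤ s) : pvC xs s = pvC2 xs s := by
  unfold pvC pvC2
  have hnle : xs.length ≤ 4*s*(xs.length/(4*s)+1) := by
    have h1 := Nat.div_add_mod xs.length (4*s)
    have h2 : xs.length % (4*s) < 4*s := Nat.mod_lt _ (by omega)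
    rw [Nat.mul_succ]
    omega
  calc ∑ i ∈ Finset.range xs.length, pvA xs i * pvCoef s (i+1)
      = ∑ i ∈ Finset.range (4*s*(xs.length/(4*s)+1)), pvA xs i * pvCoef s (i+1) :=
        Finset.sum_subset (Finset.range_subset.mpr fun x hx => Finset.mem_range.mpr (by omega))
          (fun i _ hni => by rw [pvA_zero xs i (by simp at hni; omega)]; ring)
    _ = ∑ b ∈ Finset.range (xs.length/(4*s)+1),
          ∑ i ∈ Finset.range (4*s), pvA xs (4*s*b+i) * pvCoef s (4*s*b+i+1) := pv_grid _ _ _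
    _ = ∑ b ∈ Finset.range (xs.length/(4*s)+1), pvBlk xs s b :=
        Finset.sum_congr rfl fun b _ => pv_inner xs s b hs

-- ===== VERDICT (by name: the statement is the Claim_ definition above) =====
theorem onePhase_spec : Claim_equal_onePhase := by
  intro xs _
  unfold Spec_onePhase
  rw [pv_onePhase, pv_onePhase_alt]
  exact List.map_congr_left fun k _ => by rw [pv_C_eq xs (k+1) (by omega)]
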